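-- pv_equiv track=rewrite | github.com/Aaush-Raj/lowHighTrends | App/common_functionsV2.py | above_closest_value
-- ===== SOURCE A (Python) =====
-- def above_closest_value(lst, target):
--     above_closest = None
--     min_diff = float('inf')
--     for value in lst:
--         if value > target:
--             diff = value - target
--             if diff < min_diff:
--                 above_closest = value
--                 min_diff = diff
--
--     index = lst.index(above_closest)
--     return index
-- ===== SOURCE B (Python) =====
-- def above_closest_value(lst, target):
--     for value in sorted(lst):
--         if value > target:
--             return lst.index(value)
--     raise ValueError("no value above target")
-- ===== Notes on version B (the rewrite author's own statement) =====
-- stated objective: alternative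
-- what changed: Replaces A's single-pass min-diff tracking loop with sort-then-scan: sort the list ascending and return lst.index of the first sorted value strictly above target.
import Mathlib
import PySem

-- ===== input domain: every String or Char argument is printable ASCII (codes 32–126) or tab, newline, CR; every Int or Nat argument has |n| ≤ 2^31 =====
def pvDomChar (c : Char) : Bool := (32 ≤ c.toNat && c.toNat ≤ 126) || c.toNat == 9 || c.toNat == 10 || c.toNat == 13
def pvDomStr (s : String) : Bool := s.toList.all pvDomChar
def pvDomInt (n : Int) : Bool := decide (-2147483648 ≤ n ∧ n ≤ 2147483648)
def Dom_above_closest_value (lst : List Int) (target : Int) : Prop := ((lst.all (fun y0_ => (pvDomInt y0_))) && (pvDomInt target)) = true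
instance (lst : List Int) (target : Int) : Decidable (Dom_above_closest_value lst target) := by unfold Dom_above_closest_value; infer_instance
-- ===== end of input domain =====

-- B replaces A's single-pass min-diff tracking with sort-then-scan (alternative algorithm); same values, same ValueError domain.


-- ===== PORT A =====
-- A's loop state: (above_closest : Option Int, min_diff : Option Int) with none = float('inf').
def aStepA (target : Int) (st : Option Int × Option Int) (value : Int) : Option Int × Option Int :=
  if value > target then
    let diff := value - target
    if (match st.2 with | none => true | some m => diff < m) then (some value, some diff) else st
  else st

def above_closest_value (lst : List Int) (target : Int) : Int :=
  let st := lst.foldl (aStepA target) (none, none)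
  match st.1 with
  | some v => ((PySem.List.index? lst v).getD 0 : Nat)   -- lst.index(above_closest); found under Pre_
  | none => 0   -- lst.index(None) raises ValueError: excluded by Pre_

-- ===== PORT B =====
-- for value in sorted(lst): if value > target: return lst.index(value)  (first-match scan = find?)
def above_closest_value_alt (lst : List Int) (target : Int) : Int :=
  match (PySem.List.sorted lst (fun x => x) false).find? (fun value => value > target) with
  | some value => ((PySem.List.index? lst value).getD 0 : Nat)
  | none => 0   -- raise ValueError: excluded by Pre_

-- ===== PRECONDITION & SPEC =====
-- A raises ValueError (lst.index(None)) exactly when no element is strictly greater than target.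
def Pre_above_closest_value (lst : List Int) (target : Int) : Prop := (lst.any (fun v => target < v)) = true
instance (lst : List Int) (target : Int) : Decidable (Pre_above_closest_value lst target) := by unfold Pre_above_closest_value; infer_instance
def pvWitness_above_closest_value : List Int × Int := ([3, 1, 7, 2], 2)

def Spec_above_closest_value (lst : List Int) (target : Int) (out : Int) : Prop := out = above_closest_value_alt lst target
instance (lst : List Int) (target : Int) (out : Int) : Decidable (Spec_above_closest_value lst target out) := by unfold Spec_above_closest_value; infer_instance

-- ===== CLAIM (what is proved, stated in full; the proofs are below) =====
def Claim_equal_above_closest_value : Prop := ∀ (lst : List Int) (target : Int), Dom_above_closest_value lst target → Pre_above_closest_value lst target → Spec_above_closest_value lst target (above_closest_value lst target)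

-- ===== LEMMAS AND PROOFS =====

-- A's fold keeps exactly the running minimum of the values above target.
theorem aStepA_fst (target : Int) (lst : List Int) (b : Int) (d : Int) (hd : d = b - target) :
    (lst.foldl (aStepA target) (some b, some d)).1
      = some ((lst.filter (fun v => v > target)).foldl min b) := by
  induction lst generalizing b d with
  | nil => simp
  | cons x t ih =>
    simp only [List.foldl_cons, aStepA, List.filter_cons]
    by_cases hx : x > target
    · simp only [hx, decide_true, if_pos]
      by_cases hlt : x - target < d
      · simp only [hlt, decide_true, if_true]
        rw [ih _ _ rfl]
        have : min b x = x := by omega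
        simp [this]
      · simp only [hlt, decide_false, Bool.false_eq_true, if_false]
        rw [ih _ _ hd]
        have : min b x = b := by omega
        simp [this]
    · simp only [hx, decide_false, Bool.false_eq_true, if_false]
      rw [ih _ _ hd]

theorem foldA_none (target : Int) (lst : List Int) :
    (lst.foldl (aStepA target) (none, none)).1
      = PySem.List.min? (lst.filter (fun v => v > target)) (fun v => v) := by
  induction lst with
  | nil => simp [PySem.List.min?]
  | cons x t ih =>
    simp only [List.foldl_cons, aStepA, List.filter_cons]
    by_cases hx : x > target
    · simp only [hx, decide_true, if_pos]
      rw [aStepA_fst target t x (x - target) rfl]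
      simp [PySem.List.min?_id_cons]
    · simp only [hx, decide_false, Bool.false_eq_true, if_false]
      rw [ih]

-- B's scan of the sorted list finds exactly the minimum of the values above target.
theorem find?_sorted_eq_min? (lst : List Int) (target : Int)
    (h : (lst.any (fun v => target < v)) = true) :
    (PySem.List.sorted lst (fun x => x) false).find? (fun value => value > target)
      = PySem.List.min? (lst.filter (fun v => v > target)) (fun v => v) := by
  obtain ⟨m', hm'⟩ : ∃ m', PySem.List.min? (lst.filter (fun v => v > target)) (fun v => v) = some m' := by
    rcases hx : PySem.List.min? (lst.filter (fun v => v > target)) (fun v => v) with _ | m'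
    · rw [PySem.List.min?_eq_none_iff] at hx
      simp only [List.any_eq_true] at h
      obtain ⟨v, hv, hvt⟩ := h
      have : v ∈ lst.filter (fun v => v > target) := by
        simp [List.mem_filter, hv]; exact of_decide_eq_true hvt
      simp [hx] at this
    · exact ⟨m', rfl⟩
  have hm'mem : m' ∈ lst.filter (fun v => v > target) := PySem.List.min?_mem hm'
  have hm'lst : m' ∈ lst := (List.mem_filter.mp hm'mem).1
  have hm't : m' > target := by
    have := (List.mem_filter.mp hm'mem).2; exact of_decide_eq_true this
  have hm'min : ∀ y ∈ lst.filter (fun v => v > target), m' ≤ y := by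
    intro y hy; exact PySem.List.min?_isMin hm' y hy
  -- find? is some
  rcases hf : (PySem.List.sorted lst (fun x => x) false).find? (fun value => value > target)
      with _ | m
  · exfalso
    rw [List.find?_eq_none] at hf
    have : m' ∈ PySem.List.sorted lst (fun x => x) false := (PySem.List.mem_sorted _ _ _ _).mpr hm'lst
    exact absurd (decide_eq_true hm't) (by simpa using hf m' this)
  · -- split the sorted list at the found element
    rw [List.find?_eq_some_iff_append] at hf
    obtain ⟨hpm, as, bs, hsplit, hprev⟩ := hf
    have hmt : m > target := of_decide_eq_true hpm
    have hmlst : m ∈ lst := by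
      have : m ∈ PySem.List.sorted lst (fun x => x) false := by
        rw [hsplit]; simp
      exact (PySem.List.mem_sorted _ _ _ _).mp this
    have hpw : (PySem.List.sorted lst (fun x => x) false).Pairwise
        (fun a b => (fun x => x) a ≤ (fun x => x) b) := PySem.List.sorted_pairwise lst _
    -- m ≤ m'
    have hmm' : m ≤ m' := by
      have hmem' : m' ∈ PySem.List.sorted lst (fun x => x) false := (PySem.List.mem_sorted _ _ _ _).mpr hm'lst
      rw [hsplit] at hmem' hpw
      rcases List.mem_append.mp hmem' with hin | hin
      · exfalso
        have := hprev m' hin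
        simp at this
        omega
      · rcases List.mem_cons.mp hin with he | hin
        · omega
        · have := (List.pairwise_append.mp hpw).2.1
          exact (List.pairwise_cons.mp this).1 m' hin
    -- m' ≤ m
    have hm'm : m' ≤ m := hm'min m (by simp [List.mem_filter, hmlst]; exact hmt)
    have : m = m' := le_antisymm hmm' hm'm
    rw [hm', this]

-- ===== VERDICT (by name: the statement is the Claim_ definition above) =====
theorem above_closest_value_spec : Claim_equal_above_closest_value := by
  intro lst target _ hpre
  unfold Spec_above_closest_value above_closest_value above_closest_value_alt
  simp only [foldA_none, find?_sorted_eq_min? lst target hpre]
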